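-- pv_equiv track=rewrite | github.com/giladabramson/Brain_project | hnn_project/hnn_original/scripts/md_to_pdf.py | paginate
-- ===== SOURCE A (Python) =====
-- PAGE_HEIGHT = 792  # points (11in)
--
-- MARGIN_Y = 72
--
-- LINE_HEIGHT = 14
--
-- def paginate(lines: list[str]) -> list[list[str]]:
--     pages: list[list[str]] = []
--     current: list[str] = []
--     y = PAGE_HEIGHT - MARGIN_Y
--     for line in lines:
--         if y < MARGIN_Y:
--             pages.append(current)
--             current = []
--             y = PAGE_HEIGHT - MARGIN_Y
--         current.append(line)
--         y -= LINE_HEIGHT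
--     if current:
--         pages.append(current)
--     return pages or [[]]
-- ===== SOURCE B (Python) =====
-- PAGE_HEIGHT = 792  # points (11in)
--
-- MARGIN_Y = 72
--
-- LINE_HEIGHT = 14
--
-- # A page starts with y = PAGE_HEIGHT - MARGIN_Y = 720 and flushes once y drops
-- # below MARGIN_Y = 72, i.e. after (720 - 72) // 14 + 1 = 47 lines per page.
-- LINES_PER_PAGE = (PAGE_HEIGHT - 2 * MARGIN_Y) // LINE_HEIGHT + 1  # = 47
--
-- def paginate(lines: list[str]) -> list[list[str]]:
--     pages: list[list[str]] = []
--     i = 0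
--     while i < len(lines):
--         pages.append(lines[i:i + LINES_PER_PAGE])
--         i += LINES_PER_PAGE
--     return pages or [[]]
-- ===== Notes on version B (the rewrite author's own statement) =====
-- stated objective: simpler
-- what changed: Replaces the running y-coordinate simulation with one current page accumulator by deriving the fixed 47-line page capacity in closed form and chunking the input by index slicing.
import Mathlib
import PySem

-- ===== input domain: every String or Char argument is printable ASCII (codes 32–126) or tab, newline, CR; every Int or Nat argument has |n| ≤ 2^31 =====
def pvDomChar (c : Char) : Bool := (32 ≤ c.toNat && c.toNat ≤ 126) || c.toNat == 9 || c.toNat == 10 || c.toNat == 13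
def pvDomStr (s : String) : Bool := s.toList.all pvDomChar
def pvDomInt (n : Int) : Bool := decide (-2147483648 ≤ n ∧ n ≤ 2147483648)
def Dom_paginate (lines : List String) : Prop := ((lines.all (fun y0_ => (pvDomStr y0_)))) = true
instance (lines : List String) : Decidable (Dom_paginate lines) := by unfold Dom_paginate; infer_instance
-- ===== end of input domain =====

-- B replaces A's running y-coordinate simulation by closed-form 47-line chunking (objective: simpler).

-- ===== PORT A =====
-- one iteration of A's for-loop over state (pages, current, y)
def paginateStep : (List (List String) × List String × Int) → String →
    List (List String) × List String × Int
  | (pages, current, y), line =>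
    if y < 72 then (pages ++ [current], [line], (792 - 72) - 14)
    else (pages, current ++ [line], y - 14)

def paginate (lines : List String) : List (List String) :=
  let st := lines.foldl paginateStep ([], [], 792 - 72)
  let pages := if st.2.1 ≠ [] then st.1 ++ [st.2.1] else st.1
  if pages = [] then [[]] else pages

-- ===== PORT B =====
-- LINES_PER_PAGE = (PAGE_HEIGHT - 2*MARGIN_Y) // LINE_HEIGHT + 1
def linesPerPage : Int := PySem.Int.floordiv (792 - 2 * 72) 14 + 1

-- the while loop of Source B: slice off LINES_PER_PAGE lines at a time
def altLoop (lines : List String) (i : Int) (pages : List (List String)) :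
    List (List String) :=
  if i < (lines.length : Int) then
    altLoop lines (i + linesPerPage) (pages ++ [PySem.List.slice lines (some i) (some (i + linesPerPage))])
  else pages
termination_by ((lines.length : Int) - i).toNat
decreasing_by
  have h : linesPerPage = 47 := by decide
  omega

def paginate_alt (lines : List String) : List (List String) :=
  let pages := altLoop lines 0 []
  if pages = [] then [[]] else pages

-- ===== PRECONDITION & SPEC =====
def Spec_paginate (lines : List String) (out : List (List String)) : Prop := out = paginate_alt lines
instance (lines : List String) (out : List (List String)) : Decidable (Spec_paginate lines out) := by unfold Spec_paginate; infer_instance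

-- ===== CLAIM (what is proved, stated in full; the proofs are below) =====
def Claim_equal_paginate : Prop := ∀ (lines : List String), Dom_paginate lines → Spec_paginate lines (paginate lines)

-- ===== LEMMAS AND PROOFS =====

-- reference chunking: successive 47-line blocks
def chunk (l : List String) : List (List String) :=
  if l = [] then [] else l.take 47 :: chunk (l.drop 47)
termination_by l.length
decreasing_by
  rename_i h
  have : l.length ≠ 0 := fun hn => h (List.eq_nil_of_length_eq_zero hn)
  simp [List.length_drop]; omega

-- continuation form of A's loop: pages flushed so far are pages, current page is `current`
def chunkAux (current : List String) : List String → List (List String)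
  | [] => if current = [] then [] else [current]
  | l :: ls => if current.length = 47 then current :: chunkAux [l] ls
               else chunkAux (current ++ [l]) ls

theorem chunkAux_eq_chunk (lines current : List String) (h : current.length ≤ 47) :
    chunkAux current lines = chunk (current ++ lines) := by
  induction lines generalizing current with
  | nil =>
    simp only [chunkAux, List.append_nil]
    by_cases hc : current = []
    · simp [hc, chunk]
    · rw [chunk]
      simp [hc, List.take_of_length_le h, List.drop_eq_nil_of_le h, chunk]
  | cons l ls ih =>
    simp only [chunkAux]
    by_cases hf : current.length = 47
    · rw [if_pos hf, ih [l] (by simp)]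
      have hne : current ++ l :: ls ≠ [] := by simp
      have hrhs : chunk (current ++ l :: ls) = current :: chunk (l :: ls) := by
        rw [chunk, if_neg hne, List.take_append_of_le_length (by omega),
            List.take_of_length_le (by omega), List.drop_append_of_le_length (by omega),
            List.drop_eq_nil_of_le (by omega), List.nil_append]
      rw [hrhs]
      simp
    · rw [if_neg hf, ih (current ++ [l]) (by simp; omega)]
      simp

theorem foldl_paginate_eq (lines : List String) :
    ∀ (pages : List (List String)) (current : List String), current.length ≤ 47 →
    (if (lines.foldl paginateStep (pages, current, (792 - 72) - 14 * (current.length : Int))).2.1 ≠ []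
     then (lines.foldl paginateStep (pages, current, (792 - 72) - 14 * (current.length : Int))).1
          ++ [(lines.foldl paginateStep (pages, current, (792 - 72) - 14 * (current.length : Int))).2.1]
     else (lines.foldl paginateStep (pages, current, (792 - 72) - 14 * (current.length : Int))).1)
    = pages ++ chunkAux current lines := by
  induction lines with
  | nil =>
    intro pages current h
    simp only [List.foldl_nil, chunkAux]
    by_cases hc : current = [] <;> simp [hc]
  | cons l ls ih =>
    intro pages current h
    simp only [List.foldl_cons, paginateStep]
    by_cases hf : current.length = 47
    · have hcond : ((792 : Int) - 72) - 14 * (current.length : Int) < 72 := by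
        rw [hf]; norm_num
      rw [if_pos hcond]
      rw [show ((792 : Int) - 72) - 14 = (792 - 72) - 14 * (([l] : List String).length : Int) from by simp]
      rw [ih (pages ++ [current]) [l] (by simp)]
      simp [chunkAux, hf]
    · have hcond : ¬ (((792 : Int) - 72) - 14 * (current.length : Int) < 72) := by
        have : current.length ≤ 46 := by omega
        have : (current.length : Int) ≤ 46 := by exact_mod_cast this
        omega
      rw [if_neg hcond]
      rw [show ((792 : Int) - 72) - 14 * (current.length : Int) - 14
            = (792 - 72) - 14 * ((current ++ [l]).length : Int) from by
          simp [List.length_append]; ring]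
      rw [ih pages (current ++ [l]) (by simp; omega)]
      simp [chunkAux, hf]

theorem altLoop_eq_chunk (lines : List String) :
    ∀ (k : Nat) (pages : List (List String)),
    altLoop lines (k : Int) pages = pages ++ chunk (lines.drop k) := by
  intro k
  induction hk : lines.length - k using Nat.strong_induction_on generalizing k with
  | _ n ih =>
    intro pages
    rw [altLoop]
    have h47 : linesPerPage = 47 := by decide
    by_cases hlt : (k : Int) < (lines.length : Int)
    · rw [if_pos hlt, h47]
      have hklt : k < lines.length := by exact_mod_cast hlt
      have hslice : PySem.List.slice lines (some (k : Int)) (some ((k : Int) + ((47 : Nat) : Int))) =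
          (lines.drop k).take 47 := PySem.List.slice_natCast_add lines k 47
      norm_num at hslice
      rw [hslice]
      have hcast : ((k : Int) + 47) = ((k + 47 : Nat) : Int) := by push_cast; ring
      rw [hcast, ih (lines.length - (k + 47)) (by omega) (k + 47) rfl]
      rw [List.append_assoc, List.singleton_append]
      congr 1
      have hne : lines.drop k ≠ [] := by
        simp [List.drop_eq_nil_iff]; omega
      conv_rhs => rw [chunk, if_neg hne]
      rw [List.drop_drop]
    · rw [if_neg hlt]
      have : lines.length ≤ k := by exact_mod_cast not_lt.mp hlt
      rw [List.drop_eq_nil_of_le this, chunk]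
      simp

-- ===== VERDICT (by name: the statement is the Claim_ definition above) =====
theorem paginate_spec : Claim_equal_paginate := by
  intro lines _
  simp only [Spec_paginate, paginate, paginate_alt]
  have hA := foldl_paginate_eq lines [] [] (by simp)
  rw [show ((792 : Int) - 72) - 14 * ((([] : List String)).length : Int) = 792 - 72 from by simp] at hA
  have hB := altLoop_eq_chunk lines 0 []
  simp only [Nat.cast_zero, List.drop_zero, List.nil_append] at hB
  have hAux := chunkAux_eq_chunk lines [] (by simp)
  simp only [List.nil_append] at hAux
  rw [hA, hAux, hB]
  simp
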